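-- pv_equiv track=rewrite | github.com/emRival/rekap_absensi | absensi_app_streamlit_v5.py | valid_jam_smpsmk
-- ===== SOURCE A (Python) =====
-- def valid_jam_smpsmk(jam_list):
--     masuk = None
--     pulang = None
--     for jam in jam_list:
--         if jam >= "07:00" and masuk is None:
--             masuk = jam
--         if jam <= "15:00":
--             pulang = jam
--     return masuk, pulang
-- ===== SOURCE B (Python) =====
-- def valid_jam_smpsmk(jam_list):
--     def solve(lo, hi):
--         # (masuk, pulang) for jam_list[lo:hi], combined divide-and-conquer
--         if hi - lo == 0:
--             return (None, None)
--         if hi - lo == 1: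
--             j = jam_list[lo]
--             return (j if j >= "07:00" else None, j if j <= "15:00" else None)
--         mid = (lo + hi) // 2
--         lm, lp = solve(lo, mid)
--         rm, rp = solve(mid, hi)
--         return (lm if lm is not None else rm, rp if rp is not None else lp)
--     return solve(0, len(jam_list))
-- ===== Notes on version B (the rewrite author's own statement) =====
-- stated objective: alternative
-- what changed: Replaces A's fused left-to-right overwrite loop with a divide-and-conquer over index halves whose results are merged by an associative combine (left-biased first-match, right-biased last-match).
import Mathlib
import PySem

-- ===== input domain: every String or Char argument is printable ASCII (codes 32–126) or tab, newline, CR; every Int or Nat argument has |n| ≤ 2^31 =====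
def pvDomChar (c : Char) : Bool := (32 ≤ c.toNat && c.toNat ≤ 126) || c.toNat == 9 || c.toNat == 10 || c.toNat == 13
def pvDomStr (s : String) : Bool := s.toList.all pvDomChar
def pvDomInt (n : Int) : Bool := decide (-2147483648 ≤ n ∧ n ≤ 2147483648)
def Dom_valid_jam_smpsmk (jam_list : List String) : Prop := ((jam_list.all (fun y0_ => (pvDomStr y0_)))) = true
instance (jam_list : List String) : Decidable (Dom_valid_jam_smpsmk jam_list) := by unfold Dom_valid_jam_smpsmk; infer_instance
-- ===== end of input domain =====

-- B replaces A's fused overwrite loop by a divide-and-conquer over index halves with an associative combine; same O(n) cost, different algorithm.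
-- ===== PORT A =====
def valid_jam_smpsmk (jam_list : List String) : Option String × Option String :=
  jam_list.foldl
    (fun (st : Option String × Option String) jam =>
      let masuk := if "07:00" ≤ jam ∧ st.1 = none then some jam else st.1
      let pulang := if jam ≤ "15:00" then some jam else st.2
      (masuk, pulang))
    (none, none)

-- ===== PORT B =====
-- combine: masuk from the left half if present else the right; pulang from the right half if present else the left
def pvCombine (l r : Option String × Option String) : Option String × Option String :=
  ((match l.1 with | some v => some v | none => r.1),
   (match r.2 with | some v => some v | none => l.2))

-- solve(lo, hi) of Source B; the extra fuel argument (≥ hi - lo at every call) only makes the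
-- recursion structural — the computation is Source B's divide-and-conquer step for step
def pvSolve (jam_list : List String) (fuel lo hi : Nat) : Option String × Option String :=
  match fuel with
  | 0 => (none, none)
  | fuel + 1 =>
    if hi - lo = 0 then (none, none)
    else if hi - lo = 1 then
      let j := (jam_list[lo]?).getD ""   -- Python jam_list[lo]; lo is always in range on B's calls
      ((if "07:00" ≤ j then some j else none), (if j ≤ "15:00" then some j else none))
    else
      let mid := (lo + hi) / 2
      pvCombine (pvSolve jam_list fuel lo mid) (pvSolve jam_list fuel mid hi)

def valid_jam_smpsmk_alt (jam_list : List String) : Option String × Option String :=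
  pvSolve jam_list jam_list.length 0 jam_list.length

-- ===== PRECONDITION & SPEC =====
def Spec_valid_jam_smpsmk (jam_list : List String) (out : Option String × Option String) : Prop := out = valid_jam_smpsmk_alt jam_list
instance (jam_list : List String) (out : Option String × Option String) : Decidable (Spec_valid_jam_smpsmk jam_list out) := by unfold Spec_valid_jam_smpsmk; infer_instance

-- ===== CLAIM (what is proved, stated in full; the proofs are below) =====
def Claim_equal_valid_jam_smpsmk : Prop := ∀ (jam_list : List String), Dom_valid_jam_smpsmk jam_list → Spec_valid_jam_smpsmk jam_list (valid_jam_smpsmk jam_list)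

-- ===== LEMMAS AND PROOFS =====

-- the common characterisation both ports are reduced to
def pvSpec (xs : List String) : Option String × Option String :=
  (xs.find? (fun j => decide ("07:00" ≤ j)),
   (xs.filter (fun j => decide (j ≤ "15:00"))).getLast?)

theorem pvOrElse_none {α : Type} (o : Option α) : (o.orElse fun _ => none) = o := by
  cases o <;> rfl

theorem valid_jam_foldl (xs : List String) (m p : Option String) :
    xs.foldl
      (fun (st : Option String × Option String) jam =>
        let masuk := if "07:00" ≤ jam ∧ st.1 = none then some jam else st.1
        let pulang := if jam ≤ "15:00" then some jam else st.2
        (masuk, pulang)) (m, p)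
    = (m.orElse (fun _ => xs.find? (fun j => decide ("07:00" ≤ j))),
       ((xs.filter (fun j => decide (j ≤ "15:00"))).getLast?).orElse (fun _ => p)) := by
  induction xs generalizing m p with
  | nil => cases m <;> cases p <;> simp [Option.orElse]
  | cons x xs ih =>
    simp only [List.foldl_cons, ih, List.find?, List.filter]
    refine Prod.ext ?_ ?_
    · cases m with
      | none => by_cases h : "07:00" ≤ x <;> simp [h, Option.orElse]
      | some v => simp [Option.orElse]
    · by_cases h : x ≤ "15:00"
      · simp only [decide_eq_true h, if_pos h]
        cases hf : xs.filter (fun j => decide (j ≤ "15:00")) with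
        | nil => simp [Option.orElse]
        | cons y ys =>
          rcases hl : (y :: ys).getLast? with _ | z
          · simp [List.getLast?_eq_none_iff] at hl
          · simp [hl, Option.orElse]
      · simp [h, Option.orElse]

theorem pvSpec_append (xs ys : List String) :
    pvSpec (xs ++ ys) = pvCombine (pvSpec xs) (pvSpec ys) := by
  unfold pvSpec pvCombine
  refine Prod.ext ?_ ?_
  · simp only [List.find?_append]
    cases xs.find? (fun j => decide ("07:00" ≤ j)) <;> simp
  · simp only [List.filter_append, List.getLast?_append]
    cases (ys.filter (fun j => decide (j ≤ "15:00"))).getLast? <;> simp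

theorem pvSpec_singleton (j : String) :
    pvSpec [j] = ((if "07:00" ≤ j then some j else none), (if j ≤ "15:00" then some j else none)) := by
  unfold pvSpec
  by_cases hm : "07:00" ≤ j <;> by_cases hp : j ≤ "15:00" <;>
    simp [List.find?, List.filter, hm, hp]

theorem pvSolve_eq_spec (xs : List String) :
    ∀ (fuel lo hi : Nat), hi - lo ≤ fuel → hi ≤ xs.length →
      pvSolve xs fuel lo hi = pvSpec ((xs.drop lo).take (hi - lo)) := by
  intro fuel
  induction fuel with
  | zero =>
    intro lo hi hf _
    have h0 : hi - lo = 0 := by omega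
    simp [pvSolve, h0, pvSpec]
  | succ fuel ih =>
    intro lo hi hf hhi
    rw [pvSolve]
    by_cases h0 : hi - lo = 0
    · simp [h0, pvSpec]
    · by_cases h1 : hi - lo = 1
      · have hlt : lo < xs.length := by omega
        rw [if_neg h0, if_pos h1, h1]
        have hdrop : xs.drop lo = xs[lo] :: xs.drop (lo + 1) :=
          (List.getElem_cons_drop hlt).symm
        rw [hdrop, List.take_succ_cons, List.take_zero, pvSpec_singleton]
        simp [List.getElem?_eq_getElem hlt]
      · rw [if_neg h0, if_neg h1]
        show pvCombine (pvSolve xs fuel lo ((lo + hi) / 2)) (pvSolve xs fuel ((lo + hi) / 2) hi)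
            = pvSpec ((xs.drop lo).take (hi - lo))
        have h2 : 2 ≤ hi - lo := by omega
        have hlm : lo < (lo + hi) / 2 := by omega
        have hmh : (lo + hi) / 2 < hi := by omega
        rw [ih lo ((lo + hi) / 2) (by omega) (by omega),
            ih ((lo + hi) / 2) hi (by omega) hhi,
            ← pvSpec_append]
        congr 1
        have hd : (xs.drop lo).drop ((lo + hi) / 2 - lo) = xs.drop ((lo + hi) / 2) := by
          rw [List.drop_drop]; congr 1; omega
        have hsum : hi - lo = ((lo + hi) / 2 - lo) + (hi - (lo + hi) / 2) := by omega
        rw [hsum, List.take_add, hd]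

-- ===== VERDICT (by name: the statement is the Claim_ definition above) =====
theorem valid_jam_smpsmk_spec : Claim_equal_valid_jam_smpsmk := by
  intro jam_list _
  unfold Spec_valid_jam_smpsmk valid_jam_smpsmk valid_jam_smpsmk_alt
  rw [valid_jam_foldl, pvOrElse_none,
      pvSolve_eq_spec jam_list jam_list.length 0 jam_list.length (by omega) (Nat.le_refl _)]
  simp [pvSpec]
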